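-- pv_equiv track=rewrite | github.com/OpenSourceEconomics/respy | robupy/fortran/build_robufort.py | _split_backward_induction_loops
-- ===== SOURCE A (Python) =====
-- def _split_backward_induction_loops(code_lines):
--     """ Split the backward induction procedure into the last and all
--     other periods. This is very sensitive to the formatting of of the
--     extracted for the backward induction routine
--     """
--     # Initialize containers
--     for name in ['final_period', 'other_periods']:
--         code_lines[name] = []
--
--     # Iterate over original code lines
--     for element in code_lines['original']:
--
--         # Put code into the containers for the two parts of the loop
--         for name in ['final_period', 'other_periods']:
--             code_lines[name] += [element]
--
--         # Replace loop counts
--         if ('DO' in element) and ('num_periods' in element):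
--             code_lines['final_period'][-1] = \
--                     'DO period = (num_periods - 1), (num_periods - 1), -1'
--             code_lines['other_periods'][-1] = \
--                     'DO period = (num_periods - 2), 0, -1'
--
--         # Make sure that the initialization of the outcome variables is not
--         # redone when moving from the last to previous periods.
--         if ('periods_emax' in element) and \
--                 ('missing_dble' in element):
--             code_lines['other_periods'][-1] = ''
--         if ('periods_future_payoffs' in element) and \
--                 ('missing_dble' in element):
--             code_lines['other_periods'][-1] = ''
--         if ('periods_payoffs_ex_post' in element) and \
--                 ('missing_dble' in element):
--             code_lines['other_periods'][-1] = ''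
--
--         # Ensure that there is no wrong logging messages as the loop is split
--         # up.
--         if 'CALL logging_solution(3)' in element:
--             code_lines['other_periods'][-1] = ''
--         if 'CALL logging_solution(-1)' in element:
--             code_lines['final_period'][-1] = ''
--
--     # Finishing
--     return code_lines
-- ===== SOURCE B (Python) =====
-- # Rule-table formulation: scan the rules (outer) over the lines (inner), recording
-- # index -> replacement patches in a dict; later rules overwrite earlier ones, which
-- # reproduces the original's "last matching if wins"; then apply the patch map once.
--
-- FINAL_RULES = [
--     (['DO', 'num_periods'], 'DO period = (num_periods - 1), (num_periods - 1), -1'),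
--     (['CALL logging_solution(-1)'], ''),
-- ]
--
-- OTHER_RULES = [
--     (['DO', 'num_periods'], 'DO period = (num_periods - 2), 0, -1'),
--     (['periods_emax', 'missing_dble'], ''),
--     (['periods_future_payoffs', 'missing_dble'], ''),
--     (['periods_payoffs_ex_post', 'missing_dble'], ''),
--     (['CALL logging_solution(3)'], ''),
-- ]
--
--
-- def _apply_rules(original, rules):
--     patches = {}
--     for subs, repl in rules:
--         for i, line in enumerate(original):
--             if all(s in line for s in subs):
--                 patches[i] = repl
--     return [patches.get(i, line) for i, line in enumerate(original)]
--
--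
-- def _split_backward_induction_loops(code_lines):
--     original = code_lines['original']
--     code_lines['final_period'] = _apply_rules(original, FINAL_RULES)
--     code_lines['other_periods'] = _apply_rules(original, OTHER_RULES)
--     return code_lines
-- ===== Notes on version B (the rewrite author's own statement) =====
-- stated objective: alternative
-- what changed: Replaces the single append-then-overwrite loop over lines with a declarative rule table scanned rules-outer: each rule records index->replacement patches in a dict (later rules overwrite, reproducing last-match-wins), and the patch map is applied once per target list.
import Mathlib
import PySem

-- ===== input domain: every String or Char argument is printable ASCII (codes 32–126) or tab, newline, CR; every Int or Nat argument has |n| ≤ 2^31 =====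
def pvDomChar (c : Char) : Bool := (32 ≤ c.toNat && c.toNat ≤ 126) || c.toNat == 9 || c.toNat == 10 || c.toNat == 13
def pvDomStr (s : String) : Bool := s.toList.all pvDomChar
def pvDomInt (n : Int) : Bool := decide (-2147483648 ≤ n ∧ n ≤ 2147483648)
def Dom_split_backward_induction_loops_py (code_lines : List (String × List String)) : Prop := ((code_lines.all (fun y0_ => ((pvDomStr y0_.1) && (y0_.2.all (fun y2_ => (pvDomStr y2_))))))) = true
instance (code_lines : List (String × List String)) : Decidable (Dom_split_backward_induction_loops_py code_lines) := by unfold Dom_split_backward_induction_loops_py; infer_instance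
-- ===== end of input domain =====

-- B replaces A's single append-then-overwrite loop over lines by a declarative rule table scanned
-- rules-outer, recording index->replacement patches in a dict (later rules overwrite = last match
-- wins), applied once per target list. Both Pythons mutate the argument dict in place; the claim is
-- about the return value (which IS the mutated dict, so the side effects coincide too).

-- ===== PORT A =====
-- loop body of A: append element to both lists, then each matching `if` overwrites the last slot
def pvStepA (acc : List String × List String) (element : String) : List String × List String :=
  let f := acc.1 ++ [element]
  let o := acc.2 ++ [element]
  let fo :=
    if PySem.Str.isIn "DO" element && PySem.Str.isIn "num_periods" element then
      (f.dropLast ++ ["DO period = (num_periods - 1), (num_periods - 1), -1"],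
       o.dropLast ++ ["DO period = (num_periods - 2), 0, -1"])
    else (f, o)
  let f := fo.1
  let o := fo.2
  let o := if PySem.Str.isIn "periods_emax" element && PySem.Str.isIn "missing_dble" element then
      o.dropLast ++ [""] else o
  let o := if PySem.Str.isIn "periods_future_payoffs" element && PySem.Str.isIn "missing_dble" element then
      o.dropLast ++ [""] else o
  let o := if PySem.Str.isIn "periods_payoffs_ex_post" element && PySem.Str.isIn "missing_dble" element then
      o.dropLast ++ [""] else o
  let o := if PySem.Str.isIn "CALL logging_solution(3)" element then o.dropLast ++ [""] else o
  let f := if PySem.Str.isIn "CALL logging_solution(-1)" element then f.dropLast ++ [""] else f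
  (f, o)

def split_backward_induction_loops_py (code_lines : List (String × List String)) : List (String × List String) :=
  let d := PySem.Dict.ofList code_lines
  let d := d.insert "final_period" []
  let d := d.insert "other_periods" []
  -- Pre_ guarantees the key is present; the `.getD []` stands for the KeyError A raises otherwise
  let orig := (d.get? "original").getD []
  let fo := orig.foldl pvStepA ([], [])
  ((d.insert "final_period" fo.1).insert "other_periods" fo.2).items

-- ===== PORT B =====
def pvRulesFinal : List (List String × String) :=
  [(["DO", "num_periods"], "DO period = (num_periods - 1), (num_periods - 1), -1"),
   (["CALL logging_solution(-1)"], "")]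

def pvRulesOther : List (List String × String) :=
  [(["DO", "num_periods"], "DO period = (num_periods - 2), 0, -1"),
   (["periods_emax", "missing_dble"], ""),
   (["periods_future_payoffs", "missing_dble"], ""),
   (["periods_payoffs_ex_post", "missing_dble"], ""),
   (["CALL logging_solution(3)"], "")]

def pvApplyRules (original : List String) (rules : List (List String × String)) : List String :=
  let patches := rules.foldl
    (fun (d : PySem.Dict Int String) r =>
      (PySem.List.enumerate original).foldl
        (fun (d : PySem.Dict Int String) p =>
          if r.1.all (fun sub => PySem.Str.isIn sub p.2) then d.insert p.1 r.2 else d) d)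
    PySem.Dict.empty
  (PySem.List.enumerate original).map (fun p => patches.getD p.1 p.2)

def split_backward_induction_loops_py_alt (code_lines : List (String × List String)) : List (String × List String) :=
  let d := PySem.Dict.ofList code_lines
  let orig := (d.get? "original").getD []
  ((d.insert "final_period" (pvApplyRules orig pvRulesFinal)).insert
    "other_periods" (pvApplyRules orig pvRulesOther)).items

-- ===== PRECONDITION & SPEC =====
-- Pre_ excludes inputs without an 'original' key, on which A (and B) raise KeyError.
def Pre_split_backward_induction_loops_py (code_lines : List (String × List String)) : Prop :=
  (code_lines.any (fun p => p.1 == "original")) = true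
instance (code_lines : List (String × List String)) : Decidable (Pre_split_backward_induction_loops_py code_lines) := by unfold Pre_split_backward_induction_loops_py; infer_instance

def pvWitness_split_backward_induction_loops_py : (List (String × List String)) :=
  [("original", ["DO i = 1, num_periods", "CALL logging_solution(3)"])]

def Spec_split_backward_induction_loops_py (code_lines : List (String × List String)) (out : List (String × List String)) : Prop := out = split_backward_induction_loops_py_alt code_lines
instance (code_lines : List (String × List String)) (out : List (String × List String)) : Decidable (Spec_split_backward_induction_loops_py code_lines out) := by unfold Spec_split_backward_induction_loops_py; infer_instance

-- ===== CLAIM (what is proved, stated in full; the proofs are below) =====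
def Claim_equal_split_backward_induction_loops_py : Prop := ∀ (code_lines : List (String × List String)), Dom_split_backward_induction_loops_py code_lines → Pre_split_backward_induction_loops_py code_lines → Spec_split_backward_induction_loops_py code_lines (split_backward_induction_loops_py code_lines)

-- ===== LEMMAS AND PROOFS =====

-- the per-line value B's patch dict realises: the LAST rule whose substrings all occur wins
def pvLine (rules : List (List String × String)) (e : String) : String :=
  (rules.foldl (fun (acc : Option String) r =>
    if r.1.all (fun sub => PySem.Str.isIn sub e) then some r.2 else acc) none).getD e

lemma pvEnum_getElem? (xs : List String) (s : Int) (j : Nat) (h : j < xs.length) :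
    (PySem.List.enumerate xs s)[j]? = some (s + j, xs[j]) := by
  induction xs generalizing s j with
  | nil => simp at h
  | cons x t ih =>
    rw [PySem.List.enumerate_cons]
    cases j with
    | zero => simp
    | succ k =>
      have := ih (s + 1) k (by simpa using h)
      simp only [List.getElem?_cons_succ, List.getElem_cons_succ, this]
      congr 2
      push_cast; ring

lemma pvInner_get? (orig : List String) (test : String → Bool) (r : String) :
    ∀ (s : Int) (d : PySem.Dict Int String) (i : Int),
    ((PySem.List.enumerate orig s).foldl
        (fun (d : PySem.Dict Int String) p => if test p.2 then d.insert p.1 r else d) d).get? i =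
      if 0 ≤ i - s ∧ i - s < orig.length ∧ test (orig.getD (i - s).toNat "") then some r
      else d.get? i := by
  induction orig with
  | nil =>
    intro s d i
    rw [PySem.List.enumerate_nil]
    simp only [List.foldl_nil, List.length_nil]
    rw [if_neg (by omega)]
  | cons x t ih =>
    intro s d i
    rw [PySem.List.enumerate_cons, List.foldl_cons, ih]
    by_cases htail : 0 ≤ i - (s + 1) ∧ i - (s + 1) < t.length ∧ test (t.getD (i - (s + 1)).toNat "")
    · rw [if_pos htail]
      have hk : 0 ≤ i - s ∧ i - s < (x :: t).length := by simp at htail ⊢; omega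
      have hge : (i - s).toNat = (i - (s + 1)).toNat + 1 := by omega
      rw [if_pos ⟨hk.1, hk.2, by rw [hge, List.getD_cons_succ]; exact htail.2.2⟩]
    · rw [if_neg htail]
      by_cases hi : i = s
      · subst hi
        simp only [sub_self, Int.toNat_zero, List.getD_cons_zero, List.length_cons]
        by_cases hx : test x
        · rw [if_pos hx, PySem.Dict.get?_insert_self,
            if_pos (show (0:Int) ≤ 0 ∧ (0:Int) < ((t.length + 1 : Nat) : Int) ∧ test x = true from
              ⟨le_refl 0, by exact_mod_cast Nat.succ_pos t.length, hx⟩)]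
        · rw [if_neg hx, if_neg (fun hc => hx hc.2.2)]
      · have hne : i ≠ s := hi
        have hstep : (if test x then d.insert s r else d).get? i = d.get? i := by
          split
          · exact PySem.Dict.get?_insert_of_ne _ _ hne
          · rfl
        rw [hstep]
        by_cases hhead : 0 ≤ i - s ∧ i - s < (x :: t).length ∧ test ((x :: t).getD (i - s).toNat "")
        · exfalso
          have h1 : 1 ≤ i - s := by
            rcases hhead with ⟨h0, _, _⟩
            omega
          apply htail
          have hge : (i - s).toNat = (i - (s + 1)).toNat + 1 := by omega
          refine ⟨by omega, by simp at hhead; omega, ?_⟩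
          have := hhead.2.2
          rw [hge, List.getD_cons_succ] at this
          exact this
        · rw [if_neg hhead]

lemma pvOuter_get? (orig : List String) (rules : List (List String × String)) :
    ∀ (d : PySem.Dict Int String) (i : Int),
    (rules.foldl (fun (d : PySem.Dict Int String) r =>
        (PySem.List.enumerate orig).foldl
          (fun (d : PySem.Dict Int String) p =>
            if r.1.all (fun sub => PySem.Str.isIn sub p.2) then d.insert p.1 r.2 else d) d) d).get? i =
      rules.foldl (fun (acc : Option String) r =>
        if 0 ≤ i ∧ i < orig.length ∧
            r.1.all (fun sub => PySem.Str.isIn sub (orig.getD i.toNat "")) then some r.2 else acc)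
        (d.get? i) := by
  induction rules with
  | nil => intro d i; rfl
  | cons r rs ih =>
    intro d i
    simp only [List.foldl_cons]
    rw [ih]
    have h := pvInner_get? orig (fun e => r.1.all (fun sub => PySem.Str.isIn sub e)) r.2 0 d i
    simp only [sub_zero] at h
    rw [h]

lemma pvFoldl_if_congr {α : Type} (rs : List α) (c c' : α → Prop) [DecidablePred c]
    [DecidablePred c'] (f : α → Option String) (h : ∀ r, c r ↔ c' r) :
    ∀ acc : Option String,
      rs.foldl (fun acc r => if c r then f r else acc) acc =
        rs.foldl (fun acc r => if c' r then f r else acc) acc := by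
  induction rs with
  | nil => intro acc; rfl
  | cons r rs ih =>
    intro acc
    simp only [List.foldl_cons]
    rw [ih]
    congr 1
    by_cases hc : c r
    · rw [if_pos hc, if_pos ((h r).mp hc)]
    · rw [if_neg hc, if_neg (fun hc' => hc ((h r).mpr hc'))]

lemma pvApplyRules_eq (orig : List String) (rules : List (List String × String)) :
    pvApplyRules orig rules = orig.map (pvLine rules) := by
  unfold pvApplyRules
  apply List.ext_getElem
  · simp [PySem.List.length_enumerate]
  · intro j h1 h2
    have hj : j < orig.length := by simpa [PySem.List.length_enumerate] using h1
    rw [List.getElem_map, List.getElem_map]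
    have henum : (PySem.List.enumerate orig)[j]'(by simpa [PySem.List.length_enumerate] using hj)
        = ((j : Int), orig[j]) := by
      rw [List.getElem_eq_iff]
      have h0 := pvEnum_getElem? orig 0 j hj
      rw [zero_add] at h0
      exact h0
    rw [henum]
    simp only [PySem.Dict.getD_eq_get?_getD]
    rw [pvOuter_get? orig rules PySem.Dict.empty (j : Int), PySem.Dict.get?_empty]
    have hg : orig.getD ((j : Int)).toNat "" = orig[j] := by
      rw [Int.toNat_natCast]
      exact List.getD_eq_getElem orig "" hj
    rw [pvFoldl_if_congr rules _
      (fun r => r.1.all (fun sub => PySem.Str.isIn sub orig[j]) = true) (fun r => some r.2)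
      (fun r => by
        rw [hg]
        constructor
        · exact fun hc => hc.2.2
        · exact fun hc => ⟨Int.natCast_nonneg j, by exact_mod_cast hj, hc⟩)]
    rfl

lemma pvStepA_eq (acc : List String × List String) (e : String) :
    pvStepA acc e = (acc.1 ++ [pvLine pvRulesFinal e], acc.2 ++ [pvLine pvRulesOther e]) := by
  simp only [pvStepA, pvLine, pvRulesFinal, pvRulesOther, List.foldl_cons, List.foldl_nil,
    List.all_cons, List.all_nil, Bool.and_true]
  split_ifs <;> simp_all

lemma pvFoldA_eq (l : List String) (f o : List String) :
    l.foldl pvStepA (f, o) =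
      (f ++ l.map (pvLine pvRulesFinal), o ++ l.map (pvLine pvRulesOther)) := by
  induction l generalizing f o with
  | nil => simp
  | cons x xs ih => simp [pvStepA_eq, ih]

lemma pvInsert_comm_overwrite {κ ν : Type} [BEq κ] [LawfulBEq κ] (d : PySem.Dict κ ν)
    (a b : κ) (v v' w : ν) (hab : a ≠ b) :
    ((d.insert a v).insert b w).insert a v' = (d.insert a v').insert b w := by
  have hca : ∀ x : ν, (d.insert a x).contains a = true := fun x => PySem.Dict.contains_insert_self ..
  have hcb : ∀ x : ν, (d.insert a x).contains b = d.contains b := by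
    intro x; rw [PySem.Dict.contains_insert]
    simp [beq_iff_eq, hab.symm]
  have h1 : ((d.insert a v).insert b w).contains a = true := by
    rw [PySem.Dict.contains_insert, hca]; simp
  apply PySem.Dict.ext
  rw [PySem.Dict.items_insert, if_pos h1, PySem.Dict.items_insert ((d.insert a v')) b w,
    PySem.Dict.items_insert (d.insert a v) b w, hcb, hcb]
  by_cases hb : d.contains b = true
  · rw [if_pos hb, if_pos hb, PySem.Dict.items_insert, PySem.Dict.items_insert]
    by_cases ha : d.contains a = true
    · rw [if_pos ha, if_pos ha]
      simp only [List.map_map]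
      apply List.map_congr_left
      intro p _
      simp only [Function.comp_def]
      by_cases h2 : p.1 = a <;> by_cases h3 : p.1 = b <;> simp_all
    · rw [if_neg ha, if_neg ha]
      have hmem : ∀ p ∈ d.items, (p.1 == a) = false := by
        intro p hp
        by_contra h
        exact ha (List.any_eq_true.mpr ⟨p, hp, by simpa using h⟩)
      simp only [List.map_append, List.map_map]
      congr 1
      · apply List.map_congr_left
        intro p hp
        have h4 := hmem p hp
        simp only [Function.comp_def]
        by_cases h3 : p.1 = b <;> simp_all [hab.symm]
      · simp [hab]
  · rw [if_neg hb, if_neg hb, PySem.Dict.items_insert, PySem.Dict.items_insert]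
    by_cases ha : d.contains a = true
    · rw [if_pos ha, if_pos ha]
      simp only [List.map_append, List.map_map]
      congr 1
      · apply List.map_congr_left
        intro p _
        simp only [Function.comp_def]
        by_cases h2 : p.1 = a <;> simp_all
      · simp [hab.symm]
    · rw [if_neg ha, if_neg ha]
      have hmem : ∀ p ∈ d.items, (p.1 == a) = false := by
        intro p hp
        by_contra h
        exact ha (List.any_eq_true.mpr ⟨p, hp, by simpa using h⟩)
      simp only [List.map_append, List.append_assoc]
      congr 1
      · have : List.map (fun p => if (p.1 == a) = true then (a, v') else p) d.items
            = List.map id d.items := List.map_congr_left (fun p hp => by simp [hmem p hp])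
        simpa using this
      · simp [hab.symm]

-- ===== VERDICT (by name: the statement is the Claim_ definition above) =====
theorem split_backward_induction_loops_py_spec : Claim_equal_split_backward_induction_loops_py := by
  intro code_lines _ _
  show _ = _
  simp only [split_backward_induction_loops_py, split_backward_induction_loops_py_alt,
    pvFoldA_eq, pvApplyRules_eq, List.nil_append]
  have hg : (((PySem.Dict.ofList code_lines).insert "final_period" ([] : List String)).insert
      "other_periods" []).get? "original" = (PySem.Dict.ofList code_lines).get? "original" := by
    rw [PySem.Dict.get?_insert_of_ne _ _ (by decide), PySem.Dict.get?_insert_of_ne _ _ (by decide)]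
  rw [hg, pvInsert_comm_overwrite _ "final_period" "other_periods" _ _ _ (by decide),
    PySem.Dict.insert_insert_self]
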